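-- pv_equiv track=rewrite | github.com/Vulmatch/Vulmatch | extract_sig/diff.py | find_struct
-- ===== SOURCE A (Python) =====
-- def find_struct(arguments,changed_structs):
--  elements=arguments.split(',')
--  tokens=[]
--  for element in elements:
--   tmp_tokens=element.split(' ')
--   for tmp_token in tmp_tokens:
--    tokens.append(tmp_token)
--  tainted_var=[]
--  for struct in changed_structs:
--   if struct in tokens:
--    struct_var_names=find_var_names(struct,tokens)
--    for name in struct_var_names:
--     tainted_var.append(name)
--  return tainted_var
--
-- def find_var_names(struct,tokens):
--  var_names=[]
--  for index in range(0,len(tokens)):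
--   if tokens[index]==struct:
--    var_name=tokens[index+1]
--    var_name=var_name.strip("*")
--    var_names.append(var_name)
--  return var_names
-- ===== SOURCE B (Python) =====
-- def find_struct(arguments, changed_structs):
--     tokens = [t for part in arguments.split(',') for t in part.split(' ')]
--     next_names = {}
--     for tok, nxt in zip(tokens, tokens[1:]):
--         next_names.setdefault(tok, []).append(nxt.strip('*'))
--     tainted_var = []
--     for struct in changed_structs:
--         if struct in next_names:
--             tainted_var.extend(next_names[struct])
--     return tainted_var
-- ===== Notes on version B (the rewrite author's own statement) =====
-- stated objective: alternative
-- what changed: Instead of rescanning the whole token list for every changed struct (membership test plus an index sweep per struct), B makes one pass over consecutive token pairs building a dict from token to the list of stripped following names, then answers each struct with a single dict lookup.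
import Mathlib
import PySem

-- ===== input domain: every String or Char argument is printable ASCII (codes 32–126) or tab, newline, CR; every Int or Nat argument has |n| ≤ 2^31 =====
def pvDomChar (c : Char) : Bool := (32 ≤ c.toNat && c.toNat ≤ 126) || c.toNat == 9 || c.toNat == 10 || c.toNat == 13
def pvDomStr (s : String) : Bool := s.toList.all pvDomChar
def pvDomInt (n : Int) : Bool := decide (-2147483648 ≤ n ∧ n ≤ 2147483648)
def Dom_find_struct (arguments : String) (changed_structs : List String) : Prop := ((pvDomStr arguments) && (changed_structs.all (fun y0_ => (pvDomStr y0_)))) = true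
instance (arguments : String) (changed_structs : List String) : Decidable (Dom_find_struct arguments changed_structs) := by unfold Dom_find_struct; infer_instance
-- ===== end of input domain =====

-- B replaces A's per-struct rescan of the token list by a single pass that builds a
-- token -> following-names dict, then one lookup per struct.


-- s.split(sep) for the non-empty literal separators used below (split? is none only for sep = "")
def pySplit (s sep : String) : List String := (PySem.Str.split? s sep).getD []

-- ===== PORT A =====
-- tokens[index+1] is ported with pyGetD (default ""); Python raises IndexError exactly
-- where that default would be read, and Pre_find_struct excludes those inputs.
def find_var_names (struct : String) (tokens : List String) : List String :=
  (PySem.List.pyRange 0 (tokens.length : Int) 1).foldl (fun var_names index =>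
    if PySem.List.pyGetD tokens index "" == struct then
      var_names ++ [PySem.Str.stripChars (PySem.List.pyGetD tokens (index + 1) "") "*"]
    else var_names) []

def find_struct (arguments : String) (changed_structs : List String) : List String :=
  let elements := pySplit arguments ","
  let tokens := elements.foldl (fun acc element => acc ++ pySplit element " ") []
  changed_structs.foldl (fun tainted_var struct =>
    if tokens.contains struct then tainted_var ++ find_var_names struct tokens
    else tainted_var) []

-- ===== PORT B =====
def find_struct_alt (arguments : String) (changed_structs : List String) : List String :=
  let tokens := (pySplit arguments ",").flatMap (fun part => pySplit part " ")
  let next_names := (tokens.zip (tokens.drop 1)).foldl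
    (fun d p => d.modify p.1 [] (· ++ [PySem.Str.stripChars p.2 "*"])) PySem.Dict.empty
  changed_structs.foldl (fun tainted_var struct =>
    if next_names.contains struct then tainted_var ++ next_names.getD struct []
    else tainted_var) []

-- ===== PRECONDITION & SPEC =====
def pvTokens (arguments : String) : List String :=
  (pySplit arguments ",").flatMap (fun part => pySplit part " ")

-- Pre_ excludes exactly the inputs on which A raises IndexError: some changed struct equal
-- to the very last token (find_var_names then reads tokens[index+1] past the end).
def Pre_find_struct (arguments : String) (changed_structs : List String) : Prop :=
  ∀ s ∈ changed_structs, (pvTokens arguments).getLast? ≠ some s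
instance (arguments : String) (changed_structs : List String) : Decidable (Pre_find_struct arguments changed_structs) := by unfold Pre_find_struct; infer_instance

def pvWitness_find_struct : String × List String := ("struct foo *x, int y", ["foo"])

def Spec_find_struct (arguments : String) (changed_structs : List String) (out : List String) : Prop := out = find_struct_alt arguments changed_structs
instance (arguments : String) (changed_structs : List String) (out : List String) : Decidable (Spec_find_struct arguments changed_structs out) := by unfold Spec_find_struct; infer_instance

-- ===== CLAIM (what is proved, stated in full; the proofs are below) =====
def Claim_equal_find_struct : Prop := ∀ (arguments : String) (changed_structs : List String), Dom_find_struct arguments changed_structs → Pre_find_struct arguments changed_structs → Spec_find_struct arguments changed_structs (find_struct arguments changed_structs)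
-- ===== LEMMAS AND PROOFS =====

-- A's nested token loop builds the same token list as B's flatMap.
theorem tokens_eq (arguments : String) :
    (pySplit arguments ",").foldl (fun acc element => acc ++ pySplit element " ") []
      = pvTokens arguments := by
  simpa using PySem.List.foldl_append_eq_flatMap
    (fun element => pySplit element " ") (pySplit arguments ",") []

-- find_var_names as a filter/map over Nat indices.
theorem find_var_names_eq_filter (struct : String) (tokens : List String) :
    find_var_names struct tokens
      = ((List.range tokens.length).filter (fun k => tokens.getD k "" == struct)).map
          (fun k => PySem.Str.stripChars (tokens.getD (k + 1) "") "*") := by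
  unfold find_var_names
  rw [PySem.List.foldl_append_if, PySem.List.pyRange_one, List.filter_map, List.map_map,
    List.nil_append]
  simp only [Int.sub_zero, Int.toNat_natCast, Function.comp_def, zero_add,
    ← Nat.cast_add_one, PySem.List.pyGetD_natCast]

-- The Nat-index form equals the consecutive-pairs form, provided the last token is not
-- struct (exactly Pre_'s condition; otherwise A reads past the end of the list).
theorem filter_range_eq_zip (struct : String) (tokens : List String)
    (h : tokens.getLast? ≠ some struct) :
    ((List.range tokens.length).filter (fun k => tokens.getD k "" == struct)).map
        (fun k => PySem.Str.stripChars (tokens.getD (k + 1) "") "*")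
      = ((tokens.zip (tokens.drop 1)).filter (fun p => p.1 == struct)).map
          (fun p => PySem.Str.stripChars p.2 "*") := by
  induction tokens with
  | nil => simp
  | cons t ts ih =>
    rw [List.length_cons, List.range_succ_eq_map, List.filter_cons, List.filter_map]
    cases ts with
    | nil =>
      have ht : ¬ (t == struct) = true := by simpa using h
      simp [ht]
    | cons u rest =>
      have h' : (u :: rest).getLast? ≠ some struct := by
        rwa [List.getLast?_cons_cons] at h
      have tail := ih h'
      by_cases ht : (t == struct) = true <;>
        simp_all [List.map_map, Function.comp_def]

theorem getD_of_not_contains (d : PySem.Dict String (List String)) (s : String)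
    (h : d.contains s = false) : d.getD s [] = [] := by
  have h0 : d.get? s = none := (PySem.Dict.get?_eq_none_iff_contains d s).mpr h
  simp [PySem.Dict.getD, h0]

-- B's dict maps s to exactly the stripped successors of s's occurrences.
theorem dict_getD_eq (tokens : List String) (s : String) :
    ((tokens.zip (tokens.drop 1)).foldl
        (fun d p => d.modify p.1 [] (· ++ [PySem.Str.stripChars p.2 "*"])) PySem.Dict.empty).getD s []
      = ((tokens.zip (tokens.drop 1)).filter (fun p => p.1 == s)).map
          (fun p => PySem.Str.stripChars p.2 "*") := by
  have h := PySem.Dict.getD_foldl_modify_append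
    (l := (tokens.zip (tokens.drop 1)).map (fun p => (p.1, PySem.Str.stripChars p.2 "*")))
    (d := (PySem.Dict.empty : PySem.Dict String (List String))) (c := s)
  rw [List.foldl_map] at h
  simpa [List.filter_map, List.map_map, Function.comp_def] using h

theorem fvn_empty_of_not_mem (struct : String) (tokens : List String)
    (h : tokens.contains struct = false) :
    ((List.range tokens.length).filter (fun k => tokens.getD k "" == struct)) = [] := by
  rw [List.filter_eq_nil_iff]
  intro k hk
  have hk' : k < tokens.length := List.mem_range.mp hk
  have hmem : tokens.getD k "" ∈ tokens := by
    rw [List.getD_eq_getElem _ _ hk']; exact List.getElem_mem hk'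
  have hns : struct ∉ tokens := by simpa using h
  simp only [beq_iff_eq]
  exact fun he => hns (he ▸ hmem)

-- ===== VERDICT (by name: the statement is the Claim_ definition above) =====
theorem find_struct_spec : Claim_equal_find_struct := by
  intro arguments changed_structs _ hpre
  unfold Spec_find_struct find_struct find_struct_alt
  dsimp only
  rw [tokens_eq]
  rw [show (List.flatMap (fun part => pySplit part " ") (pySplit arguments ","))
        = pvTokens arguments from rfl]
  apply PySem.List.foldl_congr_mem
  intro acc struct hs
  have hlast := hpre struct hs
  set tokens := pvTokens arguments with htok
  set d := (tokens.zip (tokens.drop 1)).foldl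
    (fun d p => d.modify p.1 [] (· ++ [PySem.Str.stripChars p.2 "*"])) PySem.Dict.empty with hd
  have hA : (if tokens.contains struct then acc ++ find_var_names struct tokens else acc)
      = acc ++ find_var_names struct tokens := by
    by_cases hc : tokens.contains struct
    · rw [if_pos hc]
    · rw [if_neg hc, find_var_names_eq_filter,
        fvn_empty_of_not_mem struct tokens (by simpa using hc)]
      simp
  have hB : (if d.contains struct then acc ++ d.getD struct [] else acc)
      = acc ++ d.getD struct [] := by
    by_cases hc : d.contains struct
    · rw [if_pos hc]
    · rw [if_neg hc, getD_of_not_contains d struct (by simpa using hc)]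
      simp
  rw [hA, hB, hd, dict_getD_eq, find_var_names_eq_filter,
    filter_range_eq_zip struct tokens hlast]
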